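-- pv_equiv track=rewrite | github.com/PommeDev/Morpion-Online-python | Client_Interface.py | codage
-- ===== SOURCE A (Python) =====
-- class morpion:
--     def __init__(self):
--         self.grille = [["#","#","#"],["#","#","#"],["#","#","#"]]
--         self.save = [["#","#","#"],["#","#","#"],["#","#","#"]]
--         self.soluce = {
--         1:["#","#","#"],
--         2:["O","#","#"],3:["#","O","#"],4:["#","#","O"],
--         5:["O","O","#"],6:["O","#","O"],7:["#","O","O"],
--         8:["O","O","O"],
--         9:["X","#","#"],10:["#","X","#"],11:["#","#","X"],
--         12:["X","X","#"],13:["X","#","X"],14:["#","X","X"],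
--         15:["X","X","X"],
--         16:["O","X","#"],17:["O","#","X"],18:["O","X","X"],
--         19:["X","O","#"],21:["X","O","O"],
--         22:["X","O","X"],23:["O","X","O"],
--         24:["#","X","O"],25:["X","#","O"],26:["X","X","O"],
--         27:["#","O","X"],29:["O","O","X"]
--         }
--         assert type(self.grille) == list and self.save == [["#","#","#"],["#","#","#"],["#","#","#"]] and self.soluce == {1:["#","#","#"],2:["O","#","#"],3:["#","O","#"],4:["#","#","O"],5:["O","O","#"],6:["O","#","O"],7:["#","O","O"],8:["O","O","O"],9:["X","#","#"],10:["#","X","#"],11:["#","#","X"],12:["X","X","#"],13:["X","#","X"],14:["#","X","X"],15:["X","X","X"],16:["O","X","#"],17:["O","#","X"],18:["O","X","X"],19:["X","O","#"],21:["X","O","O"],22:["X","O","X"],23:["O","X","O"],24:["#","X","O"],25:["X","#","O"],26:["X","X","O"],27:["#","O","X"],29:["O","O","X"]}, "les données du morpion sont corrompue"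
--
--     def affiche(self):
--         txt = f"{self.grille[0][:3]}\n{self.grille[1][:3]}\n{self.grille[2][:3]}"
--
--         text = Label(text=txt)
--         screen.update()
--         text.pack()
--
--     def ajoute(self,c,l,XorO):
--         """Cette méthode prend des info : colonne ligne et X ou O puis modifie la grille de morpion en fonction"""
--         assert type(self.grille) == list , " la grille n'est pas une liste"
--         assert type(self.grille) == list and self.save ==  [["#","#","#"],["#","#","#"],["#","#","#"]] and self.soluce == {1:["#","#","#"],2:["O","#","#"],3:["#","O","#"],4:["#","#","O"],5:["O","O","#"],6:["O","#","O"],7:["#","O","O"],8:["O","O","O"],9:["X","#","#"],10:["#","X","#"],11:["#","#","X"],12:["X","X","#"],13:["X","#","X"],14:["#","X","X"],15:["X","X","X"],16:["O","X","#"],17:["O","#","X"],18:["O","X","X"],19:["X","O","#"],21:["X","O","O"],22:["X","O","X"],23:["O","X","O"],24:["#","X","O"],25:["X","#","O"],26:["X","X","O"],27:["#","O","X"],29:["O","O","X"]}, "les données du morpion sont corrompue"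
--         assert type(self.grille[0]) == list and type(self.grille[1]) == list and type(self.grille[2]) == list , "la grille est corrompue"
--         if XorO == "O":
--             if c == 1:
--                 if l == 1:
--                     self.grille[0][0] = "O"
--                 elif l == 2:
--                     self.grille[1][0] = "O"
--                 elif l == 3:
--                     self.grille[2][0] = "O"
--             elif c == 2:
--                 if l == 1:
--                     self.grille[0][1] = "O"
--                 elif l == 2:
--                     self.grille[1][1] = "O"
--                 elif l == 3:
--                     self.grille[2][1] = "O"
--             elif c == 3:
--                 if l == 1:
--                     self.grille[0][2] = "O"
--                 elif l == 2:
--                     self.grille[1][2] = "O"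
--                 elif l == 3:
--                     self.grille[2][2] = "O"
--         elif XorO == "X":
--             if c == 1:
--                 if l == 1:
--                     self.grille[0][0] = "X"
--                 elif l == 2:
--                     self.grille[1][0] = "X"
--                 elif l == 3:
--                     self.grille[2][0] = "X"
--             elif c == 2:
--                 if l == 1:
--                     self.grille[0][1] = "X"
--                 elif l == 2:
--                     self.grille[1][1] = "X"
--                 elif l == 3:
--                     self.grille[2][1] = "X"
--             elif c == 3:
--                 if l == 1:
--                     self.grille[0][2] = "X"
--                 elif l == 2:
--                     self.grille[1][2] = "X"
--                 elif l == 3: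
--                     self.grille[2][2] = "X"
--
--     def reset(self):
--         self.grille = self.save
--
-- def codage(grille: list) -> str:
--     """cette fonction transforme le morpion en un code"""
--     assert type(grille) == list , "la grille n'est pas une liste,codage"
--     code = ""
--     h = morpion()
--     for i in range(3):
--         for key,gri in h.soluce.items():
--             if gri == grille[i]:
--                 code = code + str(key) + "/"
--     assert type(code) == str,"le code nes pas un texte, codage"
--     return code
-- ===== SOURCE B (Python) =====
-- # B encodes each row arithmetically: cells map to base-3 digits (#=0, O=1, X=2) and the
-- # digit value indexes a flat 27-entry key table, instead of scanning the soluce dict.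
-- _KEYS = [1, 4, 11, 3, 7, 27, 10, 24, 14,
--          2, 6, 17, 5, 8, 29, 16, 23, 18,
--          9, 25, 13, 19, 21, 22, 12, 26, 15]
-- _SYM = {"#": 0, "O": 1, "X": 2}
--
-- def codage(grille: list) -> str:
--     """cette fonction transforme le morpion en un code"""
--     code = ""
--     for i in range(3):
--         row = grille[i]
--         if len(row) == 3 and all(s in _SYM for s in row):
--             idx = _SYM[row[0]] * 9 + _SYM[row[1]] * 3 + _SYM[row[2]]
--             code += str(_KEYS[idx]) + "/"
--     return code
-- ===== Notes on version B (the rewrite author's own statement) =====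
-- stated objective: alternative
-- what changed: B replaces A's per-row linear scan of the 27-entry soluce dict with an arithmetic base-3 encoding of each row (#=0,O=1,X=2) that indexes a flat 27-entry key table.
import Mathlib
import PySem

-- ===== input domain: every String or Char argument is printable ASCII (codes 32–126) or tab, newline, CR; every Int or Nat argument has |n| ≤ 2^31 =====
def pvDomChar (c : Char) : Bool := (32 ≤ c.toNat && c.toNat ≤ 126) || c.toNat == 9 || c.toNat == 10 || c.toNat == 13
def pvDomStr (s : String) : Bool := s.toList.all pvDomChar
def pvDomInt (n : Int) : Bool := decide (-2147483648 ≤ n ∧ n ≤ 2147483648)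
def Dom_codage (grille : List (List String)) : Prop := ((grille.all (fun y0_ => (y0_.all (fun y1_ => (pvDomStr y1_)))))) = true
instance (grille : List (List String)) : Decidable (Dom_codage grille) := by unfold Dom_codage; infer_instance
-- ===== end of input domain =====

-- B encodes each row as a base-3 digit value (#=0,O=1,X=2) indexing a flat 27-entry key table,
-- instead of A's per-row scan of the 27-entry soluce dict (alternative algorithm; same results).

-- ===== PORT A =====
-- the items of morpion().soluce, in insertion order
def solucePairs : List (Int × List String) :=
  [(1, ["#","#","#"]),
   (2, ["O","#","#"]), (3, ["#","O","#"]), (4, ["#","#","O"]),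
   (5, ["O","O","#"]), (6, ["O","#","O"]), (7, ["#","O","O"]),
   (8, ["O","O","O"]),
   (9, ["X","#","#"]), (10, ["#","X","#"]), (11, ["#","#","X"]),
   (12, ["X","X","#"]), (13, ["X","#","X"]), (14, ["#","X","X"]),
   (15, ["X","X","X"]),
   (16, ["O","X","#"]), (17, ["O","#","X"]), (18, ["O","X","X"]),
   (19, ["X","O","#"]), (21, ["X","O","O"]),
   (22, ["X","O","X"]), (23, ["O","X","O"]),
   (24, ["#","X","O"]), (25, ["X","#","O"]), (26, ["X","X","O"]),
   (27, ["#","O","X"]), (29, ["O","O","X"])]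

def codage (grille : List (List String)) : String :=
  (PySem.List.pyRange 0 3 1).foldl (fun code i =>
    match PySem.List.pyGet? grille i with
    | none => code   -- Python raises IndexError here; excluded by Pre_codage
    | some row =>
        solucePairs.foldl (fun c kv =>
          if kv.2 == row then c ++ PySem.Int.toStr kv.1 ++ "/" else c) code) ""

-- ===== PORT B =====
-- _KEYS and _SYM of Source B
def keysTable : List Int :=
  [1, 4, 11, 3, 7, 27, 10, 24, 14,
   2, 6, 17, 5, 8, 29, 16, 23, 18,
   9, 25, 13, 19, 21, 22, 12, 26, 15]

def symDict : PySem.Dict String Int := PySem.Dict.mk [("#", 0), ("O", 1), ("X", 2)]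

def codage_alt (grille : List (List String)) : String :=
  (PySem.List.pyRange 0 3 1).foldl (fun code i =>
    match PySem.List.pyGet? grille i with
    | none => code   -- Python raises IndexError here; excluded by Pre_codage
    | some row =>
      if row.length == 3 && row.all (fun s => (PySem.Dict.get? symDict s).isSome) then
        -- row[j] for j = 0,1,2 is in range under the length-3 guard; getD's default never fires
        code ++ PySem.Int.toStr (PySem.List.pyGetD keysTable
          (PySem.Dict.getD symDict (row.getD 0 "") 0 * 9 +
           PySem.Dict.getD symDict (row.getD 1 "") 0 * 3 +
           PySem.Dict.getD symDict (row.getD 2 "") 0) 0) ++ "/"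
      else code) ""

-- ===== PRECONDITION & SPEC =====
-- Pre_ excludes grilles with fewer than 3 rows: A's grille[i] raises IndexError there (and so does B's grille[i]).
def Pre_codage (grille : List (List String)) : Prop := 3 ≤ grille.length
instance (grille : List (List String)) : Decidable (Pre_codage grille) := by unfold Pre_codage; infer_instance
def pvWitness_codage : List (List String) := [["O","#","#"], ["#","#","#"], ["X","O","X"]]

def Spec_codage (grille : List (List String)) (out : String) : Prop := out = codage_alt grille
instance (grille : List (List String)) (out : String) : Decidable (Spec_codage grille out) := by unfold Spec_codage; infer_instance

-- ===== CLAIM =====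
def Claim_equal_codage : Prop := ∀ (grille : List (List String)), Dom_codage grille → Pre_codage grille → Spec_codage grille (codage grille)

-- ===== LEMMAS AND PROOFS =====

-- a row matching nothing in the remaining pairs leaves the accumulator unchanged
lemma scan_skip (L : List (Int × List String)) (r : List String) (c : String)
    (h : ∀ kv ∈ L, kv.2 ≠ r) :
    L.foldl (fun c kv =>
      if kv.2 == r then c ++ PySem.Int.toStr kv.1 ++ "/" else c) c = c := by
  induction L generalizing c with
  | nil => rfl
  | cons kv t ih =>
    simp only [List.foldl_cons]
    rw [if_neg (by simpa using h kv (List.mem_cons_self))]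
    exact ih c (fun x hx => h x (List.mem_cons_of_mem _ hx))

-- symDict has no entry for a string other than "#","O","X"
lemma sym_invalid (s : String) (h1 : s ≠ "#") (h2 : s ≠ "O") (h3 : s ≠ "X") :
    (PySem.Dict.get? symDict s).isSome = false := by
  show (PySem.Dict.get? (PySem.Dict.mk _) s).isSome = false
  simp only [PySem.Dict.get?]
  simp
  exact ⟨fun h => h1 h.symm, fun h => h2 h.symm, fun h => h3 h.symm⟩

-- A's inner scan over solucePairs equals B's base-3 table row step, for every row r.
lemma row_eq (c : String) (r : List String) :
    solucePairs.foldl (fun c kv =>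
      if kv.2 == r then c ++ PySem.Int.toStr kv.1 ++ "/" else c) c
    = (if r.length == 3 && r.all (fun s => (PySem.Dict.get? symDict s).isSome) then
        c ++ PySem.Int.toStr (PySem.List.pyGetD keysTable
          (PySem.Dict.getD symDict (r.getD 0 "") 0 * 9 +
           PySem.Dict.getD symDict (r.getD 1 "") 0 * 3 +
           PySem.Dict.getD symDict (r.getD 2 "") 0) 0) ++ "/"
      else c) := by
  have hcells : ∀ kv ∈ solucePairs, kv.2.length = 3 ∧
      ∀ s ∈ kv.2, s = "#" ∨ s = "O" ∨ s = "X" := by decide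
  match r with
  | [x, y, z] =>
    by_cases hx : x = "#" ∨ x = "O" ∨ x = "X"
    · by_cases hy : y = "#" ∨ y = "O" ∨ y = "X"
      · by_cases hz : z = "#" ∨ z = "O" ∨ z = "X"
        · rcases hx with rfl | rfl | rfl <;> rcases hy with rfl | rfl | rfl <;>
            rcases hz with rfl | rfl | rfl <;> rfl
        · push Not at hz
          rw [if_neg (by simp [sym_invalid z hz.1 hz.2.1 hz.2.2])]
          exact scan_skip _ _ _ (fun kv hkv heq => by
            rcases hz with ⟨h1, h2, h3⟩
            have := (hcells kv hkv).2 z (by rw [heq]; simp)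
            tauto)
      · push Not at hy
        rw [if_neg (by simp [sym_invalid y hy.1 hy.2.1 hy.2.2])]
        exact scan_skip _ _ _ (fun kv hkv heq => by
          rcases hy with ⟨h1, h2, h3⟩
          have := (hcells kv hkv).2 y (by rw [heq]; simp)
          tauto)
    · push Not at hx
      rw [if_neg (by simp [sym_invalid x hx.1 hx.2.1 hx.2.2])]
      exact scan_skip _ _ _ (fun kv hkv heq => by
        rcases hx with ⟨h1, h2, h3⟩
        have := (hcells kv hkv).2 x (by rw [heq]; simp)
        tauto)
  | [] =>
    rw [if_neg (by simp)]
    exact scan_skip _ _ _ (fun kv hkv heq => by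
      have := (hcells kv hkv).1; simp [heq] at this)
  | [x] =>
    rw [if_neg (by simp)]
    exact scan_skip _ _ _ (fun kv hkv heq => by
      have := (hcells kv hkv).1; simp [heq] at this)
  | [x, y] =>
    rw [if_neg (by simp)]
    exact scan_skip _ _ _ (fun kv hkv heq => by
      have := (hcells kv hkv).1; simp [heq] at this)
  | x :: y :: z :: w :: t =>
    rw [if_neg (by simp)]
    exact scan_skip _ _ _ (fun kv hkv heq => by
      have := (hcells kv hkv).1; simp [heq] at this)

-- ===== VERDICT =====
theorem codage_spec : Claim_equal_codage := by
  intro grille _ hpre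
  unfold Pre_codage at hpre
  match grille, hpre with
  | a :: b :: c :: rest, _ =>
    show codage _ = codage_alt _
    unfold codage codage_alt
    have h3 : PySem.List.pyRange 0 3 1 = [0, 1, 2] := by decide
    rw [h3]
    have g0 : PySem.List.pyGet? (a :: b :: c :: rest) 0 = some a := by
      rw [PySem.List.pyGet?_of_nonneg (h := by norm_num)]; rfl
    have g1 : PySem.List.pyGet? (a :: b :: c :: rest) 1 = some b := by
      rw [PySem.List.pyGet?_of_nonneg (h := by norm_num)]; rfl
    have g2 : PySem.List.pyGet? (a :: b :: c :: rest) 2 = some c := by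
      rw [PySem.List.pyGet?_of_nonneg (h := by norm_num)]; rfl
    simp only [List.foldl_cons, List.foldl_nil, g0, g1, g2]
    simp only [row_eq]
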